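-- pv_equiv track=rewrite | github.com/KevRojo/Dulus | providers.py | _consolidate_web_history
-- ===== SOURCE A (Python) =====
-- def _consolidate_web_history(messages: list, manifest: str = "") -> str:
--     """Consolidate history since last assistant turn into one prompt string.
--     This ensures tool results and system notifications are correctly perceived
--     by web-based models that take a single prompt string.
--     """
--     if not messages:
--         return manifest
--
--     # Find last assistant message that actually has text or was saved
--     last_ast = -1
--     for i in range(len(messages) - 1, -1, -1):
--         if messages[i].get("role") == "assistant":
--             last_ast = i
--             break
--
--     parts = []
--     relevant = messages[last_ast + 1:] if last_ast != -1 else messages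
--
--     for m in relevant:
--         role = m.get("role", "user")
--         content = m.get("content", "")
--
--         # We only skip empty content if it's NOT a tool result.
--         # Tool results must be sent even if empty so the model knows they ran.
--         if role != "tool" and not content:
--             continue
--
--         header = f"--- [{role.upper()}] ---"
--         if role == "tool":
--             header = f"--- [Tool Result: {m.get('name', 'Unknown')}] ---"
--             if not content:
--                 content = "(No output / Empty result)"
--
--         parts.append(f"{header}\n{content}")
--
--     prompt = "\n\n".join(parts).strip()
--     if manifest:
--         prompt = manifest + "\n\n" + prompt
--
--     return prompt.strip()
-- ===== SOURCE B (Python) =====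
-- def _consolidate_web_history(messages: list, manifest: str = "") -> str:
--     """Single forward pass: an assistant turn resets the accumulated parts,
--     so only messages after the last assistant turn survive."""
--     if not messages:
--         return manifest
--     parts = []
--     for m in messages:
--         role = m.get("role", "user")
--         if role == "assistant":
--             parts = []
--             continue
--         content = m.get("content", "")
--         if role == "tool":
--             parts.append(f"--- [Tool Result: {m.get('name', 'Unknown')}] ---\n"
--                          f"{content if content else '(No output / Empty result)'}")
--         elif content:
--             parts.append(f"--- [{role.upper()}] ---\n{content}")
--     prompt = "\n\n".join(parts).strip()
--     if manifest:
--         prompt = manifest + "\n\n" + prompt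
--     return prompt.strip()
-- ===== Notes on version B (the rewrite author's own statement) =====
-- stated objective: simpler
-- what changed: Replaces the backward index scan for the last assistant turn plus slicing with a single forward pass that resets the accumulated parts whenever an assistant message is seen.
import Mathlib
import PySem

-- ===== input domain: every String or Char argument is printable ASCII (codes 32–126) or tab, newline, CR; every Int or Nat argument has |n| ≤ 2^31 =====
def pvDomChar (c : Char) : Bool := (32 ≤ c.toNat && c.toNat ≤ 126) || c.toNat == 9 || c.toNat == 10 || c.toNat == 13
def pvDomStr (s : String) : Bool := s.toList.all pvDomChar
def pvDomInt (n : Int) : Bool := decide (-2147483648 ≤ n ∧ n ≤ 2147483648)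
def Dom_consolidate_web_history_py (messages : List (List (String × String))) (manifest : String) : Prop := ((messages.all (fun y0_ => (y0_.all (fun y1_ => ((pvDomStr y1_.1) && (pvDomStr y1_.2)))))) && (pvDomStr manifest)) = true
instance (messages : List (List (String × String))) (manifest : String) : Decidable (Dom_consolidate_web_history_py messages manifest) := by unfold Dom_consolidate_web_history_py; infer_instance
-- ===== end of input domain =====

-- B replaces A's backward scan for the last assistant turn + slice with one forward pass that
-- resets the accumulated parts at each assistant message (same output; different decomposition).


-- ===== PORT A =====
-- m.get(k) on a dict (association list, first match)
def pvA_get? (m : List (String × String)) (k : String) : Option String :=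
  (m.find? (fun p => p.1 == k)).map (·.2)

-- m.get(k, d)
def pvA_getD (m : List (String × String)) (k d : String) : String :=
  (pvA_get? m k).getD d

-- the backward 'for i in range(len(messages)-1, -1, -1): … break' loop (returns -1 if no break)
def pvA_find (messages : List (List (String × String))) : List Int → Int
  | [] => -1
  | i :: rest =>
    if pvA_get? (PySem.List.pyGetD messages i []) "role" = some "assistant" then i
    else pvA_find messages rest

-- the body of 'for m in relevant: …' acting on parts
def pvA_step (parts : List String) (m : List (String × String)) : List String :=
  let role := pvA_getD m "role" "user"
  let content := pvA_getD m "content" ""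
  if role ≠ "tool" ∧ content = "" then parts
  else
    let header := "--- [" ++ PySem.Str.upper role ++ "] ---"
    let hc : String × String :=
      if role = "tool" then
        ("--- [Tool Result: " ++ pvA_getD m "name" "Unknown" ++ "] ---",
         if content = "" then "(No output / Empty result)" else content)
      else (header, content)
    parts ++ [hc.1 ++ "\n" ++ hc.2]

def consolidate_web_history_py (messages : List (List (String × String))) (manifest : String) : String :=
  if messages = [] then manifest
  else
    let last_ast := pvA_find messages (PySem.List.pyRange (PySem.List.len messages - 1) (-1) (-1))
    let relevant := if last_ast ≠ -1 then PySem.List.slice messages (some (last_ast + 1)) none else messages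
    let parts := relevant.foldl pvA_step []
    let prompt := PySem.Str.strip (PySem.Str.join "\n\n" parts)
    let prompt := if manifest ≠ "" then manifest ++ "\n\n" ++ prompt else prompt
    PySem.Str.strip prompt

-- ===== PORT B =====
-- m.get(k, d) on a dict (association list, first match)
def pvB_get (m : List (String × String)) (k d : String) : String :=
  ((m.find? (fun p => p.1 == k)).map (·.2)).getD d

-- B's loop body: assistant resets parts, tool always emits, others emit when content nonempty
def pvB_step (parts : List String) (m : List (String × String)) : List String :=
  let role := pvB_get m "role" "user"
  if role = "assistant" then []
  else
    let content := pvB_get m "content" ""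
    if role = "tool" then
      parts ++ ["--- [Tool Result: " ++ pvB_get m "name" "Unknown" ++ "] ---\n" ++
                (if content ≠ "" then content else "(No output / Empty result)")]
    else if content ≠ "" then
      parts ++ ["--- [" ++ PySem.Str.upper role ++ "] ---\n" ++ content]
    else parts

def consolidate_web_history_py_alt (messages : List (List (String × String))) (manifest : String) : String :=
  if messages = [] then manifest
  else
    let parts := messages.foldl pvB_step []
    let prompt := PySem.Str.strip (PySem.Str.join "\n\n" parts)
    let prompt := if manifest ≠ "" then manifest ++ "\n\n" ++ prompt else prompt
    PySem.Str.strip prompt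

-- ===== PRECONDITION & SPEC =====
def Spec_consolidate_web_history_py (messages : List (List (String × String))) (manifest : String) (out : String) : Prop := out = consolidate_web_history_py_alt messages manifest
instance (messages : List (List (String × String))) (manifest : String) (out : String) : Decidable (Spec_consolidate_web_history_py messages manifest out) := by unfold Spec_consolidate_web_history_py; infer_instance

-- ===== CLAIM (what is proved, stated in full; the proofs are below) =====
def Claim_equal_consolidate_web_history_py : Prop := ∀ (messages : List (List (String × String))) (manifest : String), Dom_consolidate_web_history_py messages manifest → Spec_consolidate_web_history_py messages manifest (consolidate_web_history_py messages manifest)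

-- ===== LEMMAS AND PROOFS =====

/-- Is this message an assistant turn? -/
def pvIsAst (m : List (String × String)) : Bool := pvB_get m "role" "user" == "assistant"

/-- What one non-assistant message contributes to `parts` (0 or 1 formatted strings). -/
def pvEmit (m : List (String × String)) : List String :=
  let role := pvB_get m "role" "user"
  let content := pvB_get m "content" ""
  if role = "tool" then
    ["--- [Tool Result: " ++ pvB_get m "name" "Unknown" ++ "] ---\n" ++
     (if content ≠ "" then content else "(No output / Empty result)")]
  else if content ≠ "" then ["--- [" ++ PySem.Str.upper role ++ "] ---\n" ++ content]
  else []

/-- The messages after the last assistant turn. -/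
def pvSuffix : List (List (String × String)) → List (List (String × String))
  | [] => []
  | m :: rest =>
    if rest.any pvIsAst then pvSuffix rest
    else if pvIsAst m then rest else m :: rest

theorem pvIsAst_iff (m : List (String × String)) :
    pvIsAst m = true ↔ pvA_get? m "role" = some "assistant" := by
  unfold pvIsAst pvB_get pvA_get?
  cases h : (m.find? (fun p => p.1 == "role")).map (·.2) with
  | none => simp
  | some v => simp

theorem pvB_step_eq (parts : List String) (m : List (String × String)) (h : pvIsAst m = false) :
    pvB_step parts m = parts ++ pvEmit m := by
  unfold pvB_step pvEmit
  have hr : pvB_get m "role" "user" ≠ "assistant" := by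
    intro he; simp [pvIsAst, he] at h
  simp only [if_neg hr]
  split_ifs <;> simp

theorem pvA_step_eq (parts : List String) (m : List (String × String)) :
    pvA_step parts m = parts ++ pvEmit m := by
  unfold pvA_step pvEmit
  have hget : ∀ k d, pvA_getD m k d = pvB_get m k d := fun k d => rfl
  simp only [hget]
  by_cases ht : pvB_get m "role" "user" = "tool"
  · simp only [ht]
    by_cases hc : pvB_get m "content" "" = ""
    · simp [hc, String.append_assoc]
    · simp [hc, String.append_assoc]
  · by_cases hc : pvB_get m "content" "" = ""
    · simp [ht, hc]
    · simp [ht, hc, String.append_assoc]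

theorem pvSuffix_of_noAst (l : List (List (String × String))) (h : l.any pvIsAst = false) :
    pvSuffix l = l := by
  induction l with
  | nil => rfl
  | cons m rest ih =>
    simp only [List.any_cons, Bool.or_eq_false_iff] at h
    simp [pvSuffix, h.1, h.2]

theorem pvSuffix_noAst (l : List (List (String × String))) : (pvSuffix l).any pvIsAst = false := by
  induction l with
  | nil => rfl
  | cons m rest ih =>
    by_cases hr : rest.any pvIsAst = true
    · simp [pvSuffix, hr, ih]
    · simp only [Bool.not_eq_true] at hr
      by_cases hm : pvIsAst m = true
      · simp [pvSuffix, hr, hm]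
      · simp only [Bool.not_eq_true] at hm
        simp [pvSuffix, hr, hm]

theorem pvSuffix_append (l : List (List (String × String))) (m : List (String × String)) :
    pvSuffix (l ++ [m]) = if pvIsAst m then [] else pvSuffix l ++ [m] := by
  induction l with
  | nil => simp [pvSuffix]
  | cons x r ih =>
    by_cases hm : pvIsAst m = true
    · have hany : (r ++ [m]).any pvIsAst = true := by simp [hm]
      simp [pvSuffix, hany, ih, hm]
    · simp only [Bool.not_eq_true] at hm
      have hany : (r ++ [m]).any pvIsAst = r.any pvIsAst := by simp [hm]
      by_cases hr : r.any pvIsAst = true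
      · simp [pvSuffix, hany, hr, ih, hm]
      · simp only [Bool.not_eq_true] at hr
        simp only [pvSuffix, hany, hr, ih, hm, List.cons_append]
        split_ifs <;> simp

theorem pvFoldB (l : List (List (String × String))) (acc : List String) :
    l.foldl pvB_step acc =
      (if l.any pvIsAst then [] else acc) ++ (pvSuffix l).flatMap pvEmit := by
  induction l generalizing acc with
  | nil => simp [pvSuffix]
  | cons m rest ih =>
    by_cases hm : pvIsAst m = true
    · have hstep : pvB_step acc m = [] := by
        have : pvB_get m "role" "user" = "assistant" := by simpa [pvIsAst] using hm
        simp [pvB_step, this]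
      rw [List.foldl_cons, hstep, ih]
      by_cases hr : rest.any pvIsAst = true
      · simp [pvSuffix, hr, hm]
      · simp only [Bool.not_eq_true] at hr
        simp [pvSuffix, hr, hm, pvSuffix_of_noAst rest hr]
    · simp only [Bool.not_eq_true] at hm
      rw [List.foldl_cons, pvB_step_eq acc m hm, ih]
      by_cases hr : rest.any pvIsAst = true
      · simp [pvSuffix, hr, hm]
      · simp only [Bool.not_eq_true] at hr
        simp [pvSuffix, hr, hm, pvSuffix_of_noAst rest hr]

theorem pvFoldA (l : List (List (String × String))) (acc : List String)
    (h : l.any pvIsAst = false) : l.foldl pvA_step acc = acc ++ l.flatMap pvEmit := by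
  induction l generalizing acc with
  | nil => simp
  | cons m rest ih =>
    simp only [List.any_cons, Bool.or_eq_false_iff] at h
    rw [List.foldl_cons, pvA_step_eq acc m, ih _ h.2, List.flatMap_cons, List.append_assoc]

theorem pvA_find_append (l : List (List (String × String))) (m : List (String × String))
    (idxs : List Int) (h : ∀ i ∈ idxs, 0 ≤ i ∧ i < (l.length : Int)) :
    pvA_find (l ++ [m]) idxs = pvA_find l idxs := by
  induction idxs with
  | nil => rfl
  | cons i rest ih =>
    have hi := h i (by simp)
    have hget : PySem.List.pyGetD (l ++ [m]) i [] = PySem.List.pyGetD l i [] := by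
      rw [PySem.List.pyGetD_eq_getElem _ _ hi.1 (by simp; omega),
          PySem.List.pyGetD_eq_getElem _ _ hi.1 (by simpa using hi.2)]
      rw [List.getElem_append_left]
    unfold pvA_find
    rw [hget, ih (fun j hj => h j (by simp [hj]))]

/-- The backward find loop: -1 iff no assistant, else the last assistant index,
    and the slice start it induces yields `pvSuffix`. -/
theorem pvA_find_spec (ms : List (List (String × String))) :
    (ms.any pvIsAst = false →
      pvA_find ms (PySem.List.pyRange ((ms.length : Int) - 1) (-1) (-1)) = -1) ∧
    (ms.any pvIsAst = true →
      ∃ k : Nat, pvA_find ms (PySem.List.pyRange ((ms.length : Int) - 1) (-1) (-1)) = (k : Int) ∧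
        k + 1 ≤ ms.length ∧ ms.drop (k + 1) = pvSuffix ms) := by
  induction ms using List.reverseRecOn with
  | nil =>
    constructor
    · intro _; rfl
    · intro h; simp at h
  | append_singleton l m ih =>
    have hlen : ((l ++ [m]).length : Int) - 1 = (l.length : Int) := by simp
    have hcons : PySem.List.pyRange ((l.length : Int)) (-1) (-1) =
        (l.length : Int) :: PySem.List.pyRange ((l.length : Int) - 1) (-1) (-1) :=
      PySem.List.pyRange_neg_one_cons (by omega)
    have hgetm : PySem.List.pyGetD (l ++ [m]) (l.length : Int) [] = m := by
      rw [PySem.List.pyGetD_natCast]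
      simp [List.getD]
    by_cases hm : pvIsAst m = true
    · constructor
      · intro h
        simp only [List.any_append, List.any_cons, List.any_nil, Bool.or_false,
          Bool.or_eq_false_iff] at h
        exact absurd hm (by simp [h.2])
      · intro _
        refine ⟨l.length, ?_, by simp, ?_⟩
        · rw [hlen, hcons]
          unfold pvA_find
          rw [hgetm, if_pos ((pvIsAst_iff m).mp hm)]
        · rw [pvSuffix_append]
          simp [hm]
    · simp only [Bool.not_eq_true] at hm
      have hrole : ¬ pvA_get? m "role" = some "assistant" := by
        intro hc; rw [← pvIsAst_iff] at hc; simp [hm] at hc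
      have hfind : pvA_find (l ++ [m])
          (PySem.List.pyRange (((l ++ [m]).length : Int) - 1) (-1) (-1)) =
          pvA_find l (PySem.List.pyRange ((l.length : Int) - 1) (-1) (-1)) := by
        rw [hlen, hcons, pvA_find]
        rw [hgetm, if_neg hrole]
        exact pvA_find_append l m (PySem.List.pyRange ((l.length : Int) - 1) (-1) (-1)) (fun i hi => by
          have := PySem.List.mem_pyRange_neg_one.mp hi; omega)
      have hany : (l ++ [m]).any pvIsAst = l.any pvIsAst := by simp [hm]
      constructor
      · intro h
        rw [hany] at h
        rw [hfind]; exact ih.1 h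
      · intro h
        rw [hany] at h
        obtain ⟨k, hk1, hk2, hk3⟩ := ih.2 h
        refine ⟨k, by rw [hfind]; exact hk1, by simp; omega, ?_⟩
        rw [List.drop_append_of_le_length hk2, hk3, pvSuffix_append]
        simp [hm]

-- ===== VERDICT (by name: the statement is the Claim_ definition above) =====
theorem consolidate_web_history_py_spec : Claim_equal_consolidate_web_history_py := by
  intro messages manifest _
  show _ = _
  unfold consolidate_web_history_py consolidate_web_history_py_alt
  by_cases hnil : messages = []
  · simp [hnil]
  · rw [if_neg hnil, if_neg hnil]
    have hparts :
        (let last_ast := pvA_find messages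
              (PySem.List.pyRange (PySem.List.len messages - 1) (-1) (-1))
         let relevant := if last_ast ≠ -1 then
              PySem.List.slice messages (some (last_ast + 1)) none else messages
         relevant.foldl pvA_step []) = messages.foldl pvB_step [] := by
      simp only [PySem.List.len_eq]
      by_cases hany : messages.any pvIsAst = true
      · obtain ⟨k, hk1, hk2, hk3⟩ := (pvA_find_spec messages).2 hany
        rw [hk1]
        have hne : ((k : Int) ≠ -1) := by omega
        rw [if_pos hne]
        have hcast : (k : Int) + 1 = ((k + 1 : Nat) : Int) := by push_cast; ring
        rw [hcast, PySem.List.slice_from_natCast, hk3,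
            pvFoldA _ _ (pvSuffix_noAst messages), pvFoldB]
        simp [hany]
      · simp only [Bool.not_eq_true] at hany
        rw [(pvA_find_spec messages).1 hany]
        simp only [ne_eq, not_true_eq_false, if_false,
          pvFoldA messages [] hany, pvFoldB]
        rw [pvSuffix_of_noAst messages hany]
        simp [hany]
    simp only at hparts
    simp only [hparts]
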